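-- pv_equiv track=rewrite | github.com/vjsingh1984/victor | victor/tools/langchain_adapter_tool.py | _are_tools_semantically_similar
-- ===== SOURCE A (Python) =====
-- def _are_tools_semantically_similar(name1: str, name2: str) -> bool:
--     """Check if two tool names are semantically similar (potential duplicates).
--
--     Uses simple heuristics:
--     - Same base name (ignoring prefixes/suffixes)
--     - Same functional keywords (search, fetch, request, etc.)
--
--     Args:
--         name1: First tool name
--         name2: Second tool name
--
--     Returns:
--         True if tools are semantically similar, False otherwise
--     """
--     # Normalize names: lowercase, remove prefixes/suffixes
--     norm1 = name1.lower().replace("_", " ")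
--     norm2 = name2.lower().replace("_", " ")
--
--     # Extract base names (remove common prefixes)
--     for prefix in ["lc", "langchain", "tool"]:
--         norm1 = norm1.replace(prefix, "").strip()
--         norm2 = norm2.replace(prefix, "").strip()
--
--     # Check for exact match after normalization
--     if norm1 == norm2:
--         return True
--
--     # Check for functional keyword overlap
--     search_keywords = {"search", "find", "lookup", "query"}
--     fetch_keywords = {"fetch", "get", "request", "http", "curl"}
--     shell_keywords = {"shell", "terminal", "command", "exec", "run"}
--     file_keywords = {"file", "read", "write", "edit", "directory"}
--
--     # Both are search tools
--     if (any(kw in norm1 for kw in search_keywords) and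
--         any(kw in norm2 for kw in search_keywords)):
--         return True
--
--     # Both are fetch tools
--     if (any(kw in norm1 for kw in fetch_keywords) and
--         any(kw in norm2 for kw in fetch_keywords)):
--         return True
--
--     # Both are shell tools
--     if (any(kw in norm1 for kw in shell_keywords) and
--         any(kw in norm2 for kw in shell_keywords)):
--         return True
--
--     # Both are file tools
--     if (any(kw in norm1 for kw in file_keywords) and
--         any(kw in norm2 for kw in file_keywords)):
--         return True
--
--     return False
-- ===== SOURCE B (Python) =====
-- # B: one pass over the positions of each normalized name, matching keywords that
-- # START at each position and OR-ing their category bit into an integer mask;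
-- # similar iff equal after normalization or the two masks intersect.
-- # Correct because "kw in s" (for nonempty kw) holds iff kw starts at some position of s.
--
-- _KEYWORD_BIT = {
--     "search": 1, "find": 1, "lookup": 1, "query": 1,
--     "fetch": 2, "get": 2, "request": 2, "http": 2, "curl": 2,
--     "shell": 4, "terminal": 4, "command": 4, "exec": 4, "run": 4,
--     "file": 8, "read": 8, "write": 8, "edit": 8, "directory": 8,
-- }
--
--
-- def _normalize(name: str) -> str:
--     norm = name.lower().replace("_", " ")
--     for prefix in ["lc", "langchain", "tool"]:
--         norm = norm.replace(prefix, "").strip()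
--     return norm
--
--
-- def _category_mask(norm: str) -> int:
--     mask = 0
--     for i in range(len(norm)):
--         for kw, bit in _KEYWORD_BIT.items():
--             if norm.startswith(kw, i):
--                 mask |= bit
--     return mask
--
--
-- def _are_tools_semantically_similar(name1: str, name2: str) -> bool:
--     norm1 = _normalize(name1)
--     norm2 = _normalize(name2)
--     return norm1 == norm2 or (_category_mask(norm1) & _category_mask(norm2)) != 0
-- ===== Notes on version B (the rewrite author's own statement) =====
-- stated objective: alternative
-- what changed: Instead of A's per-keyword substring scans grouped in four any()/if blocks, B walks each normalized name once by character position, OR-ing a category bit for every keyword that starts at that position into an integer bitmask, and answers with norm equality or a nonzero bitwise AND of the two masks.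
import Mathlib
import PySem

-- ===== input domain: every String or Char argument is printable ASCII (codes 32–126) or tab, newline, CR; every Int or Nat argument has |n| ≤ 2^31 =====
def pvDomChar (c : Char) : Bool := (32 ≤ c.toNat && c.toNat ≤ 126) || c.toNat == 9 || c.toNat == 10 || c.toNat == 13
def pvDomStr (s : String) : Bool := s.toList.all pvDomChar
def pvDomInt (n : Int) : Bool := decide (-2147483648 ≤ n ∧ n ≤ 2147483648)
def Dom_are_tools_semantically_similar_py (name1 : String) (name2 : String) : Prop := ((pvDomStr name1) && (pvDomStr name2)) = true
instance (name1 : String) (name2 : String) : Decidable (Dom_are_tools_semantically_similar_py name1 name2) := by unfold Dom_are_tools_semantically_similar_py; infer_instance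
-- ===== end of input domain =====

-- B walks each normalized name once by position, OR-ing a category bit for every keyword
-- starting there into an integer bitmask, and intersects the two masks (objective: alternative).

-- ===== PORT A =====
def are_tools_semantically_similar_py (name1 : String) (name2 : String) : Bool :=
  -- norm1/norm2 = name.lower().replace("_", " ")
  let norm1 := PySem.Str.replace (PySem.Str.lower name1) "_" " "
  let norm2 := PySem.Str.replace (PySem.Str.lower name2) "_" " "
  -- for prefix in ["lc", "langchain", "tool"]: both variables updated in one loop
  let p := ["lc", "langchain", "tool"].foldl
    (fun (p : String × String) pre =>
      (PySem.Str.strip (PySem.Str.replace p.1 pre ""),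
       PySem.Str.strip (PySem.Str.replace p.2 pre ""))) (norm1, norm2)
  let norm1 := p.1
  let norm2 := p.2
  if norm1 == norm2 then true
  else
    -- Python set literals of distinct keywords; 'any(kw in norm for kw in kws)' is order-insensitive
    let search_keywords := ["search", "find", "lookup", "query"]
    let fetch_keywords := ["fetch", "get", "request", "http", "curl"]
    let shell_keywords := ["shell", "terminal", "command", "exec", "run"]
    let file_keywords := ["file", "read", "write", "edit", "directory"]
    if search_keywords.any (fun kw => PySem.Str.isIn kw norm1) &&
       search_keywords.any (fun kw => PySem.Str.isIn kw norm2) then true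
    else if fetch_keywords.any (fun kw => PySem.Str.isIn kw norm1) &&
            fetch_keywords.any (fun kw => PySem.Str.isIn kw norm2) then true
    else if shell_keywords.any (fun kw => PySem.Str.isIn kw norm1) &&
            shell_keywords.any (fun kw => PySem.Str.isIn kw norm2) then true
    else if file_keywords.any (fun kw => PySem.Str.isIn kw norm1) &&
            file_keywords.any (fun kw => PySem.Str.isIn kw norm2) then true
    else false

-- ===== PORT B =====
def pvNormalize (name : String) : String :=
  ["lc", "langchain", "tool"].foldl
    (fun n pre => PySem.Str.strip (PySem.Str.replace n pre ""))
    (PySem.Str.replace (PySem.Str.lower name) "_" " ")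

-- _KEYWORD_BIT, in dict insertion order
def pvKeywordBits : List (List Char × Nat) :=
  [("search".toList, 1), ("find".toList, 1), ("lookup".toList, 1), ("query".toList, 1),
   ("fetch".toList, 2), ("get".toList, 2), ("request".toList, 2), ("http".toList, 2), ("curl".toList, 2),
   ("shell".toList, 4), ("terminal".toList, 4), ("command".toList, 4), ("exec".toList, 4), ("run".toList, 4),
   ("file".toList, 8), ("read".toList, 8), ("write".toList, 8), ("edit".toList, 8), ("directory".toList, 8)]

-- inner loop body: for kw, bit in _KEYWORD_BIT.items(): if norm.startswith(kw, i): mask |= bit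
-- (norm.startswith(kw, i) with 0 ≤ i is exactly: kw is a prefix of norm[i:], i.e. of (drop i))
def pvMaskStep (n : List Char) (mask : Nat) (i : Nat) : Nat :=
  pvKeywordBits.foldl
    (fun m kb => if PySem.Chars.startswith (n.drop i) kb.1 then m ||| kb.2 else m) mask

-- mask = 0; for i in range(len(norm)): ...
def pvCategoryMask (norm : String) : Nat :=
  (List.range norm.toList.length).foldl (pvMaskStep norm.toList) 0

def are_tools_semantically_similar_py_alt (name1 : String) (name2 : String) : Bool :=
  let norm1 := pvNormalize name1
  let norm2 := pvNormalize name2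
  norm1 == norm2 || !(pvCategoryMask norm1 &&& pvCategoryMask norm2 == 0)

-- ===== PRECONDITION & SPEC =====
def Spec_are_tools_semantically_similar_py (name1 : String) (name2 : String) (out : Bool) : Prop := out = are_tools_semantically_similar_py_alt name1 name2
instance (name1 : String) (name2 : String) (out : Bool) : Decidable (Spec_are_tools_semantically_similar_py name1 name2 out) := by unfold Spec_are_tools_semantically_similar_py; infer_instance

-- ===== CLAIM (what is proved, stated in full; the proofs are below) =====
def Claim_equal_are_tools_semantically_similar_py : Prop := ∀ (name1 : String) (name2 : String), Dom_are_tools_semantically_similar_py name1 name2 → Spec_are_tools_semantically_similar_py name1 name2 (are_tools_semantically_similar_py name1 name2)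

-- ===== LEMMAS AND PROOFS =====

-- closed form of a four-category bitmask
def pvMaskOf (a b c d : Bool) : Nat :=
  (if a then 1 else 0) ||| (if b then 2 else 0) ||| (if c then 4 else 0) ||| (if d then 8 else 0)

-- bit j of a conditional-OR fold
theorem pvTestBit_foldl_or {α : Type} (xs : List α) (c : α → Bool) (f : α → Nat)
    (m0 : Nat) (j : Nat) :
    ((xs.foldl (fun m x => if c x then m ||| f x else m) m0).testBit j)
      = (m0.testBit j || xs.any (fun x => c x && (f x).testBit j)) := by
  induction xs generalizing m0 with
  | nil => simp
  | cons x xs ih =>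
    simp only [List.foldl_cons, List.any_cons, ih]
    by_cases h : c x = true <;> simp [h, Nat.testBit_or, Bool.or_assoc]

-- bit j of the outer fold over positions
theorem pvTestBit_mask_fold (n : List Char) (is : List Nat) (m0 : Nat) (j : Nat) :
    ((is.foldl (pvMaskStep n) m0).testBit j)
      = (m0.testBit j ||
         is.any (fun i => pvKeywordBits.any
           (fun kb => PySem.Chars.startswith (n.drop i) kb.1 && (kb.2).testBit j))) := by
  induction is generalizing m0 with
  | nil => simp
  | cons i is ih =>
    simp only [List.foldl_cons, List.any_cons, ih, pvMaskStep,
      pvTestBit_foldl_or, Bool.or_assoc]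

-- a nonempty keyword occurs in n iff it starts at some position i < n.length
theorem pvAnyStart_eq_isIn (n kw : List Char) (hkw : kw ≠ []) :
    ((List.range n.length).any (fun i => PySem.Chars.startswith (n.drop i) kw))
      = PySem.Chars.isIn kw n := by
  by_cases h : PySem.Chars.isIn kw n = true
  · rw [h, List.any_eq_true]
    obtain ⟨j, hj⟩ := (PySem.Chars.exists_prefix_drop_iff_isIn kw n).2 h
    have hjlt : j < n.length := by
      by_contra hge
      have : List.drop j n = [] := List.drop_eq_nil_of_le (le_of_not_gt hge)
      rw [this] at hj
      exact hkw (List.prefix_nil.1 hj)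
    exact ⟨j, List.mem_range.2 hjlt, (PySem.Chars.startswith_iff _ _).2 hj⟩
  · rw [eq_false_of_ne_true h, List.any_eq_false]
    intro i _ hs
    exact h ((PySem.Chars.exists_prefix_drop_iff_isIn kw n).1
      ⟨i, (PySem.Chars.startswith_iff _ _).1 hs⟩)

-- distributing any over || (used to split the flat keyword pass into the four groups)
theorem pvAny_or {α : Type} (xs : List α) (p q : α → Bool) :
    xs.any (fun x => p x || q x) = (xs.any p || xs.any q) := by
  induction xs with
  | nil => rfl
  | cons x xs ih =>
    simp only [List.any_cons, ih]
    cases p x <;> cases q x <;> simp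

-- the position-scan mask equals the closed form over the four per-category isIn tests
theorem pvCategoryMask_eq (norm : String) :
    pvCategoryMask norm =
      pvMaskOf
        (["search", "find", "lookup", "query"].any (fun kw => PySem.Str.isIn kw norm))
        (["fetch", "get", "request", "http", "curl"].any (fun kw => PySem.Str.isIn kw norm))
        (["shell", "terminal", "command", "exec", "run"].any (fun kw => PySem.Str.isIn kw norm))
        (["file", "read", "write", "edit", "directory"].any (fun kw => PySem.Str.isIn kw norm)) := by
  apply Nat.eq_of_testBit_eq
  intro j
  rw [pvCategoryMask, pvTestBit_mask_fold]
  simp only [Nat.zero_testBit, Bool.false_or, pvKeywordBits, List.any_cons, List.any_nil,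
    Bool.or_false]
  have hmo : ∀ a b c d : Bool, (pvMaskOf a b c d).testBit j
      = ((a && (1 : Nat).testBit j) || (b && (2 : Nat).testBit j)
         || (c && (4 : Nat).testBit j) || (d && (8 : Nat).testBit j)) := by
    intro a b c d
    have hif : ∀ (x : Bool) (v : Nat), (if x then v else 0).testBit j = (x && v.testBit j) := by
      intro x v; cases x <;> simp [Nat.zero_testBit]
    simp [pvMaskOf, Nat.testBit_or, hif, Bool.or_assoc]
  rw [hmo]
  simp only [List.any_cons, List.any_nil, Bool.or_false, PySem.Str.isIn_eq]
  -- case on the bit index: bits 0..3 select one group, higher bits are absent everywhere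
  match j with
  | 0 =>
    simp only [show (1:Nat).testBit 0 = true by decide, show (2:Nat).testBit 0 = false by decide,
      show (4:Nat).testBit 0 = false by decide, show (8:Nat).testBit 0 = false by decide,
      Bool.and_true, Bool.and_false, Bool.or_false, Bool.false_or]
    rw [← pvAnyStart_eq_isIn norm.toList "search".toList (by decide),
        ← pvAnyStart_eq_isIn norm.toList "find".toList (by decide),
        ← pvAnyStart_eq_isIn norm.toList "lookup".toList (by decide),
        ← pvAnyStart_eq_isIn norm.toList "query".toList (by decide)]
    simp only [← pvAny_or]
  | 1 =>
    simp only [show (1:Nat).testBit 1 = false by decide, show (2:Nat).testBit 1 = true by decide,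
      show (4:Nat).testBit 1 = false by decide, show (8:Nat).testBit 1 = false by decide,
      Bool.and_true, Bool.and_false, Bool.or_false, Bool.false_or]
    rw [← pvAnyStart_eq_isIn norm.toList "fetch".toList (by decide),
        ← pvAnyStart_eq_isIn norm.toList "get".toList (by decide),
        ← pvAnyStart_eq_isIn norm.toList "request".toList (by decide),
        ← pvAnyStart_eq_isIn norm.toList "http".toList (by decide),
        ← pvAnyStart_eq_isIn norm.toList "curl".toList (by decide)]
    simp only [← pvAny_or]
  | 2 =>
    simp only [show (1:Nat).testBit 2 = false by decide, show (2:Nat).testBit 2 = false by decide,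
      show (4:Nat).testBit 2 = true by decide, show (8:Nat).testBit 2 = false by decide,
      Bool.and_true, Bool.and_false, Bool.or_false, Bool.false_or]
    rw [← pvAnyStart_eq_isIn norm.toList "shell".toList (by decide),
        ← pvAnyStart_eq_isIn norm.toList "terminal".toList (by decide),
        ← pvAnyStart_eq_isIn norm.toList "command".toList (by decide),
        ← pvAnyStart_eq_isIn norm.toList "exec".toList (by decide),
        ← pvAnyStart_eq_isIn norm.toList "run".toList (by decide)]
    simp only [← pvAny_or]
  | 3 =>
    simp only [show (1:Nat).testBit 3 = false by decide, show (2:Nat).testBit 3 = false by decide,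
      show (4:Nat).testBit 3 = false by decide, show (8:Nat).testBit 3 = true by decide,
      Bool.and_true, Bool.and_false, Bool.or_false, Bool.false_or]
    rw [← pvAnyStart_eq_isIn norm.toList "file".toList (by decide),
        ← pvAnyStart_eq_isIn norm.toList "read".toList (by decide),
        ← pvAnyStart_eq_isIn norm.toList "write".toList (by decide),
        ← pvAnyStart_eq_isIn norm.toList "edit".toList (by decide),
        ← pvAnyStart_eq_isIn norm.toList "directory".toList (by decide)]
    simp only [← pvAny_or]
  | (j + 4) =>
    have hb : ∀ v : Nat, v < 16 → Nat.testBit v (j + 4) = false := by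
      intro v hv
      apply Nat.testBit_lt_two_pow
      calc v < 16 := hv
        _ = 2 ^ 4 := by norm_num
        _ ≤ 2 ^ (j + 4) := Nat.pow_le_pow_right (by norm_num) (by omega)
    simp only [hb 1 (by norm_num), hb 2 (by norm_num), hb 4 (by norm_num), hb 8 (by norm_num),
      Bool.and_false, Bool.or_false, Bool.or_self, List.any_eq_false]
    intro i _
    decide

-- A's if-chain equals B's nonzero-intersection test, for arbitrary atom values
theorem pvKey (e a1 b1 c1 d1 a2 b2 c2 d2 : Bool) :
    (if e = true then true
     else if (a1 && a2) = true then true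
     else if (b1 && b2) = true then true
     else if (c1 && c2) = true then true
     else if (d1 && d2) = true then true
     else false)
    = (e || !(pvMaskOf a1 b1 c1 d1 &&& pvMaskOf a2 b2 c2 d2 == 0)) := by
  revert e a1 b1 c1 d1 a2 b2 c2 d2
  decide

-- ===== VERDICT (by name: the statement is the Claim_ definition above) =====
theorem are_tools_semantically_similar_py_spec : Claim_equal_are_tools_semantically_similar_py := by
  intro name1 name2 _
  unfold Spec_are_tools_semantically_similar_py
  unfold are_tools_semantically_similar_py are_tools_semantically_similar_py_alt
  simp only [pvNormalize, List.foldl, pvCategoryMask_eq]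
  exact pvKey _ _ _ _ _ _ _ _ _
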